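-- pv_equiv track=rewrite | github.com/87xdude/ValoMgr | app/core/ranks.py | _pick_lol_queue
-- ===== SOURCE A (Python) =====
-- from typing import Optional, Tuple
--
-- def _pick_lol_queue(entries: list, wanted: Optional[str]) -> Optional[dict]:
--     qmap = {"solo": "RANKED_SOLO_5x5", "flex": "RANKED_FLEX_SR"}
--     pref = qmap.get((wanted or "").lower())
--     if pref:
--         for e in entries:
--             if e.get("queueType") == pref:
--                 return e
--     for e in entries:
--         if e.get("queueType") == "RANKED_SOLO_5x5": return e
--     for e in entries:
--         if e.get("queueType") == "RANKED_FLEX_SR": return e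
--     return entries[0] if entries else None
-- ===== SOURCE B (Python) =====
-- from typing import Optional
--
-- def _pick_lol_queue(entries: list, wanted: Optional[str]) -> Optional[dict]:
--     qmap = {"solo": "RANKED_SOLO_5x5", "flex": "RANKED_FLEX_SR"}
--     pref = qmap.get((wanted or "").lower())
--     index = {}
--     for e in entries:
--         qt = e.get("queueType")
--         if qt not in index:
--             index[qt] = e
--     result = index.get(pref) if pref else None
--     if result is None:
--         result = index.get("RANKED_SOLO_5x5")
--     if result is None:
--         result = index.get("RANKED_FLEX_SR")
--     if result is None and entries:
--         result = entries[0]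
--     return result
-- ===== Notes on version B (the rewrite author's own statement) =====
-- stated objective: idiomatic
-- what changed: Replaces A's three repeated linear scans of entries by a single pass building a first-occurrence queueType->entry index, then resolves the result by priority with dict lookups and a final entries[0] fallback.
import Mathlib
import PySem

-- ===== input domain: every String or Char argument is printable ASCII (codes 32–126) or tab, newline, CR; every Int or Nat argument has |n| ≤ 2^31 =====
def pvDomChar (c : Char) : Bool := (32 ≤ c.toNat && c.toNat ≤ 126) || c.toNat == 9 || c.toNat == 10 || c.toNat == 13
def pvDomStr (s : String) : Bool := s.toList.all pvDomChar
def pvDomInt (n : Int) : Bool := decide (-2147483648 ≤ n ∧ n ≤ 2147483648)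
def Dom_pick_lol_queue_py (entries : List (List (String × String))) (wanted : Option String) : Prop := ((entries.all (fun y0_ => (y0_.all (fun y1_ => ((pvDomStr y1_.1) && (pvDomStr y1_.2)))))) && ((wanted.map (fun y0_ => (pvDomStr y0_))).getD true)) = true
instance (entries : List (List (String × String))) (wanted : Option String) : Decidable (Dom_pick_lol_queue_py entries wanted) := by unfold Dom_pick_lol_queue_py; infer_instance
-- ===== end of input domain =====

-- B replaces A's three repeated linear scans by one index-building pass (first occurrence
-- per queueType) followed by constant-time-style lookups; objective: idiomatic/alternative.

-- shared helpers: e.get("queueType") on an entry dict, and Python truthiness of Optional[str]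
def pvQT (e : List (String × String)) : Option String :=
  (e.find? (fun p => p.1 == "queueType")).map (·.2)

def pvTruthy (o : Option String) : Bool :=
  match o with
  | some s => !(s == "")
  | none => false

-- ===== PORT A =====
def pick_lol_queue_py (entries : List (List (String × String))) (wanted : Option String) : Option (List (String × String)) :=
  let qmap : PySem.Dict String String :=
    PySem.Dict.ofList [("solo", "RANKED_SOLO_5x5"), ("flex", "RANKED_FLEX_SR")]
  let pref := qmap.get? (PySem.Str.lower (wanted.getD ""))
  match (if pvTruthy pref then entries.find? (fun e => pvQT e == pref) else none) with
  | some e => some e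
  | none =>
    match entries.find? (fun e => pvQT e == some "RANKED_SOLO_5x5") with
    | some e => some e
    | none =>
      match entries.find? (fun e => pvQT e == some "RANKED_FLEX_SR") with
      | some e => some e
      | none => entries.head?

-- ===== PORT B =====
-- one pass: index queueType -> entry, keeping only the first occurrence of each type
def pvIndex (entries : List (List (String × String))) :
    PySem.Dict (Option String) (List (String × String)) :=
  entries.foldl
    (fun idx e =>
      let qt := pvQT e
      if idx.contains qt then idx else idx.insert qt e)
    PySem.Dict.empty

def pick_lol_queue_py_alt (entries : List (List (String × String))) (wanted : Option String) : Option (List (String × String)) :=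
  let qmap : PySem.Dict String String :=
    PySem.Dict.ofList [("solo", "RANKED_SOLO_5x5"), ("flex", "RANKED_FLEX_SR")]
  let pref := qmap.get? (PySem.Str.lower (wanted.getD ""))
  let idx := pvIndex entries
  let r0 := if pvTruthy pref then idx.get? pref else none
  let r1 := match r0 with
            | some e => some e
            | none => idx.get? (some "RANKED_SOLO_5x5")
  let r2 := match r1 with
            | some e => some e
            | none => idx.get? (some "RANKED_FLEX_SR")
  match r2 with
  | some e => some e
  | none => entries.head?

-- ===== PRECONDITION & SPEC =====
def Spec_pick_lol_queue_py (entries : List (List (String × String))) (wanted : Option String) (out : Option (List (String × String))) : Prop := out = pick_lol_queue_py_alt entries wanted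
instance (entries : List (List (String × String))) (wanted : Option String) (out : Option (List (String × String))) : Decidable (Spec_pick_lol_queue_py entries wanted out) := by unfold Spec_pick_lol_queue_py; infer_instance

-- ===== CLAIM (what is proved, stated in full; the proofs are below) =====
def Claim_equal_pick_lol_queue_py : Prop := ∀ (entries : List (List (String × String))) (wanted : Option String), Dom_pick_lol_queue_py entries wanted → Spec_pick_lol_queue_py entries wanted (pick_lol_queue_py entries wanted)

-- ===== LEMMAS AND PROOFS =====

-- a lookup in the first-occurrence index is exactly the first matching linear scan
theorem get?_pvIndex_fold (l : List (List (String × String)))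
    (idx : PySem.Dict (Option String) (List (String × String))) (k : Option String) :
    (l.foldl (fun idx e => if idx.contains (pvQT e) then idx else idx.insert (pvQT e) e) idx).get? k
      = (idx.get? k).or (l.find? (fun e => pvQT e == k)) := by
  induction l generalizing idx with
  | nil => simp
  | cons e l ih =>
    simp only [List.foldl_cons, List.find?_cons]
    rw [ih]
    by_cases hk : pvQT e = k
    · subst hk
      simp only [BEq.rfl]
      by_cases hc : idx.contains (pvQT e) = true
      · have hs : (idx.get? (pvQT e)).isSome := by
          rw [PySem.Dict.contains_eq_isSome_get?] at hc; exact hc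
        obtain ⟨v, hv⟩ := Option.isSome_iff_exists.mp hs
        rw [if_pos hc, hv]
        simp
      · have hn : idx.get? (pvQT e) = none := by
          rw [PySem.Dict.contains_eq_isSome_get?] at hc
          simpa using hc
        rw [if_neg hc, hn, PySem.Dict.get?_insert_self]
        simp
    · have hb : (pvQT e == k) = false := by simpa using hk
      rw [hb]
      simp only [Bool.false_eq_true]
      by_cases hc : idx.contains (pvQT e) = true
      · rw [if_pos hc]
      · rw [if_neg hc, PySem.Dict.get?_insert_of_ne idx e (Ne.symm hk)]

theorem get?_pvIndex (entries : List (List (String × String))) (k : Option String) :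
    (pvIndex entries).get? k = entries.find? (fun e => pvQT e == k) := by
  unfold pvIndex
  rw [get?_pvIndex_fold]
  simp

-- ===== VERDICT (by name: the statement is the Claim_ definition above) =====
theorem pick_lol_queue_py_spec : Claim_equal_pick_lol_queue_py := by
  intro entries wanted _
  unfold Spec_pick_lol_queue_py pick_lol_queue_py pick_lol_queue_py_alt
  simp only [get?_pvIndex]
  generalize (PySem.Dict.ofList [("solo", "RANKED_SOLO_5x5"), ("flex", "RANKED_FLEX_SR")]).get? (PySem.Str.lower (wanted.getD "")) = pref
  cases htr : pvTruthy pref <;>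
    simp only [Bool.false_eq_true, if_false, if_true] <;>
    [skip; rcases h0 : entries.find? (fun e => pvQT e == pref) with _ | e0] <;>
    rcases h1 : entries.find? (fun e => pvQT e == some "RANKED_SOLO_5x5") with _ | e1 <;>
    rcases h2 : entries.find? (fun e => pvQT e == some "RANKED_FLEX_SR") with _ | e2 <;>
    rfl
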